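-- pv_equiv track=rewrite | github.com/ahmetax/trderlem | txtokuyucu.py | is_tek_tire_var
-- ===== SOURCE A (Python) =====
-- def is_tek_tire_var(sozcuk):
--     var = 0
--     for say in range(len(sozcuk)):
--         if sozcuk[say] == "-":
--             if say==0 or say == len(sozcuk)-1:
--                 return False
--             var +=1
--
--     if var==1:
--         return True
--     else:
--         return False
-- ===== SOURCE B (Python) =====
-- def is_tek_tire_var(sozcuk):
--     ilk = sozcuk.find("-")
--     if ilk <= 0 or ilk == len(sozcuk) - 1:
--         return False
--     return sozcuk.find("-", ilk + 1) == -1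
-- ===== Notes on version B (the rewrite author's own statement) =====
-- stated objective: faster
-- what changed: Replaces A's full index loop with a manual dash counter by a first-occurrence search: find the first dash, reject a boundary position, then verify no second dash exists via a second find from the next index (no counter, no per-index Python loop, early exit once the first dash's neighbourhood is settled).
import Mathlib
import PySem

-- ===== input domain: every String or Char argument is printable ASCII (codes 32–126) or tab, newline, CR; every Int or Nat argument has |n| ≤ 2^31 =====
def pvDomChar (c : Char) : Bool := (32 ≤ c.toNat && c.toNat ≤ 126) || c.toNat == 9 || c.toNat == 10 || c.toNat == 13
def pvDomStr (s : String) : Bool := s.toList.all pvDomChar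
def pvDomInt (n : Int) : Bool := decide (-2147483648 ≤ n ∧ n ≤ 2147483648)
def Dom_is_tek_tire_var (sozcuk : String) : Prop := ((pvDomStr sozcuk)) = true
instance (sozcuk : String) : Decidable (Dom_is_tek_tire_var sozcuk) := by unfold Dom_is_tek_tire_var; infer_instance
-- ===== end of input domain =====

-- B replaces A's full index loop with a manual dash counter by two substring searches:
-- find the first dash, reject it if it sits on a boundary, then check that no second
-- dash follows (find from the next index returns -1). No counter, no per-index loop.

-- ===== PORT A =====
-- the 'for say in range(len(sozcuk))' loop: recursion over the remaining characters,
-- carrying the current index 'say' and the counter 'var'; 'len' is the full length.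
def isTekTireLoop (len : Nat) (cs : List Char) (say : Nat) (var : Nat) : Bool :=
  match cs with
  | [] => var == 1
  | c :: rest =>
      if c = '-' then
        if say = 0 ∨ say = len - 1 then false
        else isTekTireLoop len rest (say + 1) (var + 1)
      else isTekTireLoop len rest (say + 1) var

def is_tek_tire_var (sozcuk : String) : Bool :=
  isTekTireLoop sozcuk.toList.length sozcuk.toList 0 0

-- ===== PORT B =====
def is_tek_tire_var_alt (sozcuk : String) : Bool :=
  let ilk := PySem.Str.find sozcuk "-"
  if ilk ≤ 0 ∨ ilk = PySem.Str.len sozcuk - 1 then false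
  else PySem.Str.findFrom sozcuk "-" (ilk + 1) none == -1

-- ===== PRECONDITION & SPEC =====
def Spec_is_tek_tire_var (sozcuk : String) (out : Bool) : Prop := out = is_tek_tire_var_alt sozcuk
instance (sozcuk : String) (out : Bool) : Decidable (Spec_is_tek_tire_var sozcuk out) := by unfold Spec_is_tek_tire_var; infer_instance

-- ===== CLAIM (what is proved, stated in full; the proofs are below) =====
def Claim_equal_is_tek_tire_var : Prop := ∀ (sozcuk : String), Dom_is_tek_tire_var sozcuk → Spec_is_tek_tire_var sozcuk (is_tek_tire_var sozcuk)

-- ===== LEMMAS AND PROOFS =====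

-- common characterization both ports are reduced to:
-- exactly one dash, and it is neither the first nor the last character.
def charOk (l : List Char) : Bool :=
  (l.count '-' == 1) && !(l.head? == some '-') && !(l.getLast? == some '-')

lemma single_prefix_iff (c : Char) (l : List Char) : [c] <+: l ↔ l.head? = some c := by
  constructor
  · rintro ⟨t, rfl⟩; rfl
  · intro h
    cases l with
    | nil => simp at h
    | cons x t => simp at h; subst h; exact ⟨t, rfl⟩

lemma single_infix_iff (c : Char) (l : List Char) : [c] <:+: l ↔ c ∈ l := by
  constructor
  · intro h; simpa using h.sublist.subset (List.mem_singleton_self c)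
  · intro h
    obtain ⟨u, t, rfl⟩ := List.append_of_mem h
    exact ⟨u, t, by simp⟩

-- unfolding equation for one loop step of port A
lemma loop_cons (len : Nat) (c : Char) (rest : List Char) (say var : Nat) :
    isTekTireLoop len (c :: rest) say var
      = if c = '-' then
          if say = 0 ∨ say = len - 1 then false
          else isTekTireLoop len rest (say + 1) (var + 1)
        else isTekTireLoop len rest (say + 1) var := rfl

-- the loop on a strictly interior segment (1 ≤ say, say + |cs| = len):
-- no early return except at the final index; result characterised by last char and count.
lemma loop_mid (len : Nat) : ∀ (cs : List Char) (say var : Nat), cs ≠ [] → 1 ≤ say →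
    say + cs.length = len →
    isTekTireLoop len cs say var
      = (!(cs.getLast? == some '-') && (var + cs.count '-' == 1)) := by
  intro cs
  induction cs with
  | nil => intro say var h; exact absurd rfl h
  | cons c rest ih =>
      intro say var _ hsay hlen
      simp only [List.length_cons] at hlen
      cases rest with
      | nil =>
          simp only [List.length_nil] at hlen
          have hlast : say = len - 1 := by omega
          by_cases hc : c = '-'
          · subst hc
            simp [loop_cons, hlast]
          · simp [isTekTireLoop, hc]
      | cons d rest' =>
          have hlen' : (say + 1) + (d :: rest').length = len := by
            simp only [List.length_cons] at *; omega
          have h0 : ¬ (say = 0 ∨ say = len - 1) := by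
            simp only [List.length_cons] at hlen; omega
          rw [loop_cons]
          by_cases hc : c = '-'
          · rw [if_pos hc, if_neg h0, ih (say + 1) (var + 1) (by simp) (by omega) hlen']
            have h2 : ∀ k : Nat, var + 1 + k = var + (k + 1) := by omega
            simp [hc, List.count_cons, h2]
          · rw [if_neg hc, ih (say + 1) var (by simp) (by omega) hlen']
            simp [List.count_cons, hc]

-- port A computes charOk
lemma a_char (s : String) : is_tek_tire_var s = charOk s.toList := by
  unfold is_tek_tire_var charOk
  cases hcs : s.toList with
  | nil => simp [isTekTireLoop]
  | cons c rest =>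
      by_cases hc : c = '-'
      · subst hc
        simp [loop_cons]
      · cases rest with
        | nil => simp [isTekTireLoop, hc]
        | cons d rest' =>
            rw [loop_cons, if_neg hc,
              loop_mid (c :: d :: rest').length (d :: rest') 1 0 (by simp) le_rfl
                (by simp only [List.length_cons]; omega)]
            simp only [List.count_cons, List.head?_cons, Nat.zero_add]
            have hcb : (c == '-') = false := by simp [hc]
            cases hg : ((d :: rest').getLast? == some '-') <;>
              simp [hg, hcb, List.getLast?_cons_cons, Bool.and_comm]

-- port B computes charOk
lemma b_char (s : String) : is_tek_tire_var_alt s = charOk s.toList := by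
  unfold is_tek_tire_var_alt
  simp only [PySem.Str.find_eq, PySem.Str.findFrom_eq, PySem.Str.len_eq,
    show ("-".toList) = ['-'] from rfl]
  set l := s.toList with hl
  by_cases hneg : PySem.Chars.find l ['-'] = -1
  · -- no dash at all
    have hnm : '-' ∉ l := by
      intro hm
      exact (PySem.Chars.find_eq_neg_one_iff l ['-']).mp hneg ((single_infix_iff _ _).mpr hm)
    have : l.count '-' = 0 := List.count_eq_zero.mpr hnm
    simp [hneg, charOk, this]
  · have hpos : 0 ≤ PySem.Chars.find l ['-'] := by
      have := PySem.Chars.neg_one_le_find (s := l) (sub := ['-'])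
      omega
    obtain ⟨hat, hbefore⟩ := PySem.Chars.find_spec hpos
    set i := (PySem.Chars.find l ['-']).toNat with hi
    have hfi : PySem.Chars.find l ['-'] = (i : Int) := by omega
    have hget : l[i]? = some '-' := by
      rw [← List.head?_drop]; exact (single_prefix_iff _ _).mp hat
    have hilen : i < l.length := by
      by_contra h
      rw [List.getElem?_eq_none (by omega)] at hget; cases hget
    have hbef : ∀ j, j < i → l[j]? ≠ some '-' := by
      intro j hj hc
      exact hbefore j hj ((single_prefix_iff _ _).mpr (by rwa [List.head?_drop]))
    by_cases h0 : i = 0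
    · -- first dash at position 0 → both false
      have hh : l.head? = some '-' := by rw [List.head?_eq_getElem?]; simpa [h0] using hget
      rw [hfi, if_pos (Or.inl (by omega))]
      simp [charOk, hh]
    · by_cases hlast : i = l.length - 1
      · -- first dash is the last character → both false
        have hg : l.getLast? = some '-' := by
          rw [List.getLast?_eq_getElem?, ← hlast]; exact hget
        have hcond : (i : Int) ≤ 0 ∨ (i : Int) = (l.length : Int) - 1 := by
          right; omega
        rw [hfi, if_pos hcond]
        simp [charOk, hg]
      · -- interior first dash: B checks no second dash; charOk counts
        have hcond : ¬ ((i : Int) ≤ 0 ∨ (i : Int) = (l.length : Int) - 1) := by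
          push Not; constructor <;> omega
        have hk : i + 1 ≤ l.length := by omega
        rw [hfi, if_neg hcond]
        have hff := PySem.Chars.findFrom_natCast_eq_neg_one_iff l ['-'] (i + 1) hk
        rw [show ((i + 1 : Nat) : Int) = (i : Int) + 1 by push_cast; ring] at hff
        have hhead : l.head? ≠ some '-' := by
          rw [List.head?_eq_getElem?]; exact hbef 0 (by omega)
        -- count over the split at i+1: exactly one dash in the first block
        have hsplit : l = l.take (i + 1) ++ l.drop (i + 1) := (List.take_append_drop _ _).symm
        have hgete : l[i]'hilen = '-' := by
          have h := hget; rw [List.getElem?_eq_getElem hilen] at h; injection h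
        have hcnt1 : (l.take (i + 1)).count '-' = 1 := by
          have htake : l.take (i + 1) = l.take i ++ ['-'] := by
            rw [List.take_add_one, List.getElem?_eq_getElem hilen]; simp [hgete]
          have hz : (l.take i).count '-' = 0 := by
            apply List.count_eq_zero.mpr
            intro hm
            obtain ⟨j, hjm, hjg⟩ := List.mem_take_iff_getElem.mp hm
            exact hbef j (by omega) (by rw [List.getElem?_eq_getElem (by omega)]; exact congrArg some hjg)
          rw [htake]; simp [List.count_append, hz]
        by_cases hm : '-' ∈ l.drop (i + 1)
        · -- a second dash exists: B's second find succeeds, count ≥ 2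
          have : ¬ PySem.Chars.findFrom l ['-'] ((i : Int) + 1) = -1 := by
            rw [hff]; push Not; exact (single_infix_iff _ _).mpr hm
          have hc2 : l.count '-' ≠ 1 := by
            conv_lhs => rw [hsplit]
            rw [List.count_append, hcnt1]
            have : 1 ≤ (l.drop (i + 1)).count '-' := List.one_le_count_iff.mpr hm
            omega
          have hb : (PySem.Chars.findFrom l ['-'] ((i : Int) + 1) == -1) = false := by
            simp [this]
          have hcb : (l.count '-' == 1) = false := by simp [hc2]
          simp [charOk, hb, hcb]
        · -- no second dash: B true; count = 1, last char not a dash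
          have hffe : PySem.Chars.findFrom l ['-'] ((i : Int) + 1) = -1 := by
            rw [hff]; intro hinf; exact hm ((single_infix_iff _ _).mp hinf)
          have hc1 : l.count '-' = 1 := by
            conv_lhs => rw [hsplit]
            rw [List.count_append, hcnt1, List.count_eq_zero.mpr hm]
          have hgl : l.getLast? ≠ some '-' := by
            rw [List.getLast?_eq_getElem?]
            intro hg
            apply hm
            have hlt : l.length - 1 < l.length := by omega
            rw [List.getElem?_eq_getElem hlt] at hg
            have hj : l.length - 1 - (i + 1) < (l.drop (i + 1)).length := by
              simp [List.length_drop]; omega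
            apply List.mem_iff_getElem.mpr
            refine ⟨l.length - 1 - (i + 1), hj, ?_⟩
            have hidx : i + 1 + (l.length - 1 - (i + 1)) = l.length - 1 := by omega
            simp only [List.getElem_drop, hidx]
            injection hg
          rw [hffe]
          simp [charOk, hc1, hhead, hgl]

-- ===== VERDICT (by name: the statement is the Claim_ definition above) =====
theorem is_tek_tire_var_spec : Claim_equal_is_tek_tire_var := by
  intro s _
  unfold Spec_is_tek_tire_var
  rw [a_char, b_char]
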